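-- pv_equiv track=rewrite | github.com/Sujeong-Baek/Practice | 인프런-코딩테스트/구현/웅덩이.py | solution
-- ===== SOURCE A (Python) =====
-- def solution(nums):
--     R=len(nums)
--     C=len(nums[0])
--     answer=0
--     for r in range(R):
--         for c in range(C):
--             flag=True
--             for dr,dc in [(1,0),(-1,0),(0,1),(0,-1)]:
--                 nr=r+dr
--                 nc=c+dc
--                 if 0<=nr<R and 0<=nc<C and nums[r][c]>=nums[nr][nc]:
--                     flag=False
--                     break
--             if flag:
--                 answer+=1
--     return answer
-- ===== SOURCE B (Python) =====
-- def solution(nums):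
--     R = len(nums)
--     C = len(nums[0])
--     low = [[True] * C for _ in range(R)]
--     for dr, dc in [(1, 0), (-1, 0), (0, 1), (0, -1)]:
--         for r in range(R):
--             for c in range(C):
--                 nr, nc = r + dr, c + dc
--                 if 0 <= nr < R and 0 <= nc < C and nums[r][c] >= nums[nr][nc]:
--                     low[r][c] = False
--     return sum(row.count(True) for row in low)
-- ===== Notes on version B (the rewrite author's own statement) =====
-- stated objective: alternative
-- what changed: Replaces A's per-cell direction loop with a transient flag and early break by four grid-wide elimination passes that maintain a persistent boolean matrix, counted at the end.
import Mathlib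
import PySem

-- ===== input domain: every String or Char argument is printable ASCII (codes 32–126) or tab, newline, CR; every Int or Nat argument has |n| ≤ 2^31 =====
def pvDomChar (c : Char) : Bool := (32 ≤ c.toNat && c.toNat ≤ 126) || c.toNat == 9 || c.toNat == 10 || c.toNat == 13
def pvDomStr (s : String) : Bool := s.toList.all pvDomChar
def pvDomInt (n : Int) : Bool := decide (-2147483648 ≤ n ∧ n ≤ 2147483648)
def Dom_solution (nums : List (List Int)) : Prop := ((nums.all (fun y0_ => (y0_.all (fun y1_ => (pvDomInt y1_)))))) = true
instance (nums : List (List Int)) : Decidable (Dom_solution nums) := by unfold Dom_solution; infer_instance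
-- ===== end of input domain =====

-- B replaces A's per-cell direction loop (transient flag, early break) by four grid-wide
-- elimination passes over a persistent boolean matrix counted at the end (alternative
-- decomposition, same asymptotic cost).

-- shared indexing primitive: nums[i][j] for in-range non-negative i, j (Python raises
-- out of range; Pre_ keeps all accesses in range)
def pvIdx (nums : List (List Int)) (i j : Int) : Int :=
  (nums.getD i.toNat []).getD j.toNat 0

-- the guard `0<=nr<R and 0<=nc<C and nums[r][c]>=nums[nr][nc]` (identical in A and B)
def pvCond (nums : List (List Int)) (R C : Nat) (r c : Nat) (dr dc : Int) : Bool :=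
  decide (0 ≤ (r : Int) + dr ∧ (r : Int) + dr < (R : Int) ∧
          0 ≤ (c : Int) + dc ∧ (c : Int) + dc < (C : Int) ∧
          pvIdx nums ((r : Int) + dr) ((c : Int) + dc) ≤ pvIdx nums (r : Int) (c : Int))

-- ===== PORT A =====
-- A's inner direction loop: flag starts True, breaks to False on the first bad direction
def checkA (nums : List (List Int)) (R C : Nat) (r c : Nat) :
    List (Int × Int) → Bool
  | [] => true
  | (dr, dc) :: rest =>
      if pvCond nums R C r c dr dc then false
      else checkA nums R C r c rest

def solution (nums : List (List Int)) : Int :=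
  let R := nums.length
  let C := (nums.headD []).length
  (List.range R).foldl (fun acc r =>
    (List.range C).foldl (fun acc c =>
      if checkA nums R C r c [(1, 0), (-1, 0), (0, 1), (0, -1)] then acc + 1 else acc)
      acc) 0

-- ===== PORT B =====
-- one grid-wide elimination pass for a single direction (dr, dc)
def passB (nums : List (List Int)) (R C : Nat) (dr dc : Int)
    (low : List (List Bool)) : List (List Bool) :=
  (List.range R).foldl (fun low r =>
    (List.range C).foldl (fun low c =>
      if pvCond nums R C r c dr dc then low.set r ((low.getD r []).set c false)
      else low) low) low

def solution_alt (nums : List (List Int)) : Int :=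
  let R := nums.length
  let C := (nums.headD []).length
  let low := ([((1 : Int), (0 : Int)), (-1, 0), (0, 1), (0, -1)]).foldl
      (fun low d => passB nums R C d.1 d.2 low)
      (List.replicate R (List.replicate C true))
  low.foldl (fun s row => s + (row.count true : Int)) 0

-- ===== PRECONDITION & SPEC =====
-- Pre_ excludes exactly the inputs where Python A raises: the empty list (nums[0] is an
-- IndexError) and ragged inputs with a row shorter than len(nums[0]) (IndexError when read).
def Pre_solution (nums : List (List Int)) : Prop :=
  nums ≠ [] ∧ ∀ row ∈ nums, (nums.headD []).length ≤ row.length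
instance (nums : List (List Int)) : Decidable (Pre_solution nums) := by
  unfold Pre_solution; infer_instance

def pvWitness_solution : List (List Int) := [[1, 2], [2, 3]]

def Spec_solution (nums : List (List Int)) (out : Int) : Prop := out = solution_alt nums
instance (nums : List (List Int)) (out : Int) : Decidable (Spec_solution nums out) := by
  unfold Spec_solution; infer_instance

-- ===== CLAIM (what is proved, stated in full; the proofs are below) =====
def Claim_equal_solution : Prop :=
  ∀ (nums : List (List Int)), Dom_solution nums → Pre_solution nums →
    Spec_solution nums (solution nums)

-- ===== LEMMAS AND PROOFS =====

-- row-level elimination fold used to describe one pass restricted to one row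
def rowElim (q : Nat → Bool) (cs : List Nat) (row : List Bool) : List Bool :=
  cs.foldl (fun row c => if q c then row.set c false else row) row

theorem rowElim_length (q : Nat → Bool) (cs : List Nat) (row : List Bool) :
    (rowElim q cs row).length = row.length := by
  induction cs generalizing row with
  | nil => rfl
  | cons c cs ih =>
      simp only [rowElim, List.foldl_cons]
      by_cases h : q c = true
      · simp [h, rowElim] at ih ⊢; rw [ih]; simp
      · simp [h, rowElim] at ih ⊢; rw [ih]

theorem rowElim_getD (q : Nat → Bool) (cs : List Nat) (row : List Bool) (c : Nat) :
    (rowElim q cs row).getD c true =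
      if c ∈ cs ∧ c < row.length ∧ q c = true then false else row.getD c true := by
  induction cs generalizing row with
  | nil => simp [rowElim]
  | cons c' cs ih =>
      simp only [rowElim, List.foldl_cons]
      by_cases h : q c' = true
      · simp only [h, if_pos]
        rw [show (List.foldl (fun row c => if q c then row.set c false else row)
              (row.set c' false) cs) = rowElim q cs (row.set c' false) from rfl, ih]
        simp only [List.length_set]
        by_cases hc : c ∈ cs ∧ c < row.length ∧ q c = true
        · simp [hc]
        · simp only [hc, if_false]
          by_cases he : c' = c
          · subst he
            by_cases hlt : c' < row.length
            · rw [if_pos ⟨by simp, hlt, h⟩, List.getD_eq_getElem?_getD,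
                List.getElem?_set, if_pos rfl, if_pos hlt]
              rfl
            · rw [if_neg (by rintro ⟨_, h2, _⟩; exact hlt h2),
                List.getD_eq_getElem?_getD, List.getD_eq_getElem?_getD,
                List.getElem?_set, if_pos rfl, if_neg hlt]
              simp [List.getElem?_eq_none (show row.length ≤ c' by omega)]
          · have hnc : ¬(c ∈ c' :: cs ∧ c < row.length ∧ q c = true) := by
              intro hx
              rcases List.mem_cons.mp hx.1 with h1 | h1
              · exact he h1.symm
              · exact hc ⟨h1, hx.2.1, hx.2.2⟩
            rw [if_neg hnc, List.getD_eq_getElem?_getD, List.getD_eq_getElem?_getD,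
              List.getElem?_set, if_neg he]
      · simp only [h, if_neg, Bool.false_eq_true, not_false_eq_true]
        rw [show (List.foldl (fun row c => if q c then row.set c false else row) row cs)
              = rowElim q cs row from rfl, ih]
        by_cases hc : c ∈ cs ∧ c < row.length ∧ q c = true
        · simp [hc, List.mem_cons]
        · simp only [hc, if_false, List.mem_cons]
          rw [if_neg]
          rintro ⟨h1 | h1, h2, h3⟩
          · subst h1; exact absurd h3 (by simp [h])
          · exact absurd ⟨h1, h2, h3⟩ hc

-- the inner column fold of passB only touches row r
theorem matFold_eq_set (q : Nat → Bool) (r : Nat) (cs : List Nat)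
    (low : List (List Bool)) (hr : r < low.length) :
    cs.foldl (fun low c => if q c then low.set r ((low.getD r []).set c false) else low) low
      = low.set r (rowElim q cs (low.getD r [])) := by
  induction cs generalizing low with
  | nil =>
      simp only [List.foldl_nil, rowElim]
      rw [List.getD_eq_getElem _ _ hr, List.set_getElem_self]
  | cons c cs ih =>
      simp only [List.foldl_cons, rowElim]
      by_cases h : q c = true
      · simp only [h, if_pos]
        rw [ih _ (by simp [hr])]
        rw [List.set_set]
        congr 1
        rw [List.getD_eq_getElem _ _ (by simp [hr] : r < (low.set r _).length),
          List.getElem_set_self]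
        rfl
      · simp only [h, if_neg, Bool.false_eq_true, not_false_eq_true]
        exact ih low hr

-- outer row fold: each step rewrites its own row only
theorem outerFold_getD (F : Nat → List Bool → List Bool) (rs : List Nat)
    (hnd : rs.Nodup) (low : List (List Bool)) (hlt : ∀ r ∈ rs, r < low.length) (r' : Nat) :
    (rs.foldl (fun low r => low.set r (F r (low.getD r []))) low).getD r' [] =
      if r' ∈ rs then F r' (low.getD r' []) else low.getD r' [] := by
  induction rs generalizing low with
  | nil => simp
  | cons r rs ih =>
      simp only [List.foldl_cons]
      have hr : r < low.length := hlt r (by simp)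
      have hnd' : rs.Nodup := hnd.of_cons
      have hlt' : ∀ x ∈ rs, x < (low.set r (F r (low.getD r []))).length := by
        intro x hx; simp only [List.length_set]; exact hlt x (by simp [hx])
      rw [ih hnd' _ hlt']
      by_cases hmem : r' ∈ rs
      · have hne : r' ≠ r := fun he => by
          subst he; exact (List.nodup_cons.mp hnd).1 hmem
        rw [if_pos hmem, if_pos (show r' ∈ r :: rs by simp [hmem])]
        congr 1
        rw [List.getD_eq_getElem?_getD, List.getD_eq_getElem?_getD, List.getElem?_set,
          if_neg (fun h => hne h.symm)]
        rw [List.getD_eq_getElem?_getD]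
      · rw [if_neg hmem]
        by_cases he : r' = r
        · subst he
          rw [if_pos (show r' ∈ r' :: rs by simp)]
          rw [List.getD_eq_getElem?_getD, List.getElem?_set, if_pos rfl, if_pos hr]
          rfl
        · rw [if_neg (show r' ∉ r :: rs by simp [he, hmem])]
          rw [List.getD_eq_getElem?_getD, List.getD_eq_getElem?_getD, List.getElem?_set,
            if_neg (fun h => he h.symm)]
          rw [List.getD_eq_getElem?_getD]

theorem outerFold_length (F : Nat → List Bool → List Bool) (rs : List Nat)
    (low : List (List Bool)) :
    (rs.foldl (fun low r => low.set r (F r (low.getD r []))) low).length = low.length := by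
  induction rs generalizing low with
  | nil => rfl
  | cons r rs ih => simp only [List.foldl_cons]; rw [ih]; simp

-- passB in closed row form
theorem passB_eq (nums : List (List Int)) (R C : Nat) (dr dc : Int)
    (low : List (List Bool)) (hlen : low.length = R) :
    passB nums R C dr dc low =
      (List.range R).foldl
        (fun low r => low.set r (rowElim (fun c => pvCond nums R C r c dr dc)
          (List.range C) (low.getD r []))) low := by
  unfold passB
  have : ∀ (rs : List Nat), (∀ r ∈ rs, r < R) →
      rs.foldl (fun low r =>
        (List.range C).foldl (fun low c =>
          if pvCond nums R C r c dr dc then low.set r ((low.getD r []).set c false)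
          else low) low) low
      = rs.foldl (fun low r => low.set r (rowElim (fun c => pvCond nums R C r c dr dc)
          (List.range C) (low.getD r []))) low := by
    intro rs
    induction rs generalizing low hlen with
    | nil => intro _; rfl
    | cons r rs ih =>
        intro hrs
        simp only [List.foldl_cons]
        rw [matFold_eq_set _ r _ low (by rw [hlen]; exact hrs r (by simp))]
        exact ih _ (by simp [hlen]) (fun x hx => hrs x (by simp [hx]))
  exact this (List.range R) (fun r hr => List.mem_range.mp hr)

theorem passB_length (nums : List (List Int)) (R C : Nat) (dr dc : Int)
    (low : List (List Bool)) (hlen : low.length = R) :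
    (passB nums R C dr dc low).length = R := by
  rw [passB_eq nums R C dr dc low hlen, outerFold_length, hlen]

theorem passB_getD (nums : List (List Int)) (R C : Nat) (dr dc : Int)
    (low : List (List Bool)) (hlen : low.length = R) (r : Nat) (hr : r < R) :
    (passB nums R C dr dc low).getD r [] =
      rowElim (fun c => pvCond nums R C r c dr dc) (List.range C) (low.getD r []) := by
  rw [passB_eq nums R C dr dc low hlen,
    outerFold_getD _ _ (List.nodup_range) _ (fun x hx => by
      rw [hlen]; exact List.mem_range.mp hx),
    if_pos (List.mem_range.mpr hr)]

-- the fold over the direction list produces exactly A's flag, cell by cell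
theorem dirsFold_cell (nums : List (List Int)) (R C : Nat) (ds : List (Int × Int))
    (low : List (List Bool)) (hlen : low.length = R)
    (hrow : ∀ i, i < R → (low.getD i []).length = C)
    (r : Nat) (hr : r < R) (c : Nat) (hc : c < C) :
    ((ds.foldl (fun low d => passB nums R C d.1 d.2 low) low).getD r []).getD c true =
      ((low.getD r []).getD c true && checkA nums R C r c ds) := by
  induction ds generalizing low with
  | nil => simp [checkA]
  | cons d ds ih =>
      obtain ⟨dr, dc⟩ := d
      simp only [List.foldl_cons]
      have hlen' : (passB nums R C dr dc low).length = R := passB_length _ _ _ _ _ _ hlen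
      have hrow' : ∀ i, i < R → ((passB nums R C dr dc low).getD i []).length = C := by
        intro i hi
        rw [passB_getD _ _ _ _ _ _ hlen i hi, rowElim_length, hrow i hi]
      rw [ih _ hlen' hrow']
      rw [passB_getD _ _ _ _ _ _ hlen r hr, rowElim_getD]
      rw [hrow r hr]
      simp only [List.mem_range, hc, true_and]
      by_cases h : pvCond nums R C r c dr dc = true
      · simp [h, checkA]
      · simp [h, checkA]

-- counting lemma for A's inner loop
theorem foldl_count (f : Nat → Bool) (cs : List Nat) (a : Int) :
    cs.foldl (fun acc c => if f c then acc + 1 else acc) a =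
      a + ((cs.map f).count true : Int) := by
  induction cs generalizing a with
  | nil => simp
  | cons c cs ih =>
      simp only [List.foldl_cons, List.map_cons, List.count_cons]
      by_cases h : f c = true
      · rw [if_pos h, ih]; simp [h]; ring
      · rw [if_neg h, ih]; simp [h]

theorem count_eq (nums : List (List Int)) (R C : Nat) :
    (List.range R).foldl (fun acc r =>
      (List.range C).foldl (fun acc c =>
        if checkA nums R C r c [(1, 0), (-1, 0), (0, 1), (0, -1)] then acc + 1 else acc)
        acc) 0
    = (([((1 : Int), (0 : Int)), (-1, 0), (0, 1), (0, -1)]).foldl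
        (fun low d => passB nums R C d.1 d.2 low)
        (List.replicate R (List.replicate C true))).foldl
        (fun s row => s + (row.count true : Int)) 0 := by
  have hlen0 : (List.replicate R (List.replicate C true)).length = R := by simp
  have hrow0 : ∀ i, i < R →
      ((List.replicate R (List.replicate C true)).getD i []).length = C := by
    intro i hi
    rw [List.getD_eq_getElem _ _ (by simpa using hi), List.getElem_replicate]
    simp
  have hcell : ∀ r, r < R → ∀ c, c < C →
      ((((([((1 : Int), (0 : Int)), (-1, 0), (0, 1), (0, -1)]).foldl
          (fun low d => passB nums R C d.1 d.2 low)
          (List.replicate R (List.replicate C true)))).getD r []).getD c true)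
        = checkA nums R C r c [(1, 0), (-1, 0), (0, 1), (0, -1)] := by
    intro r hr c hc
    rw [dirsFold_cell nums R C _ _ hlen0 hrow0 r hr c hc]
    rw [show (List.replicate R (List.replicate C true)).getD r [] = List.replicate C true by
        rw [List.getD_eq_getElem _ _ (by simpa using hr)]; exact List.getElem_replicate ..]
    rw [List.getD_eq_getElem _ _ (by simpa using hc), List.getElem_replicate]
    simp
  have step : ∀ (low : List (List Bool)) (dr dc : Int), low.length = R →
      (∀ j, j < R → (low.getD j []).length = C) →
      (passB nums R C dr dc low).length = R ∧
      (∀ j, j < R → ((passB nums R C dr dc low).getD j []).length = C) := by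
    intro low dr dc h1 h2
    refine ⟨passB_length _ _ _ _ _ _ h1, fun j hj => ?_⟩
    rw [passB_getD _ _ _ _ _ _ h1 j hj, rowElim_length, h2 j hj]
  have s1 := step (List.replicate R (List.replicate C true)) 1 0 hlen0 hrow0
  have s2 := step _ (-1) 0 s1.1 s1.2
  have s3 := step _ 0 1 s2.1 s2.2
  have s4 := step _ 0 (-1) s3.1 s3.2
  have hfold : ([((1 : Int), (0 : Int)), (-1, 0), (0, 1), (0, -1)]).foldl
      (fun low d => passB nums R C d.1 d.2 low)
      (List.replicate R (List.replicate C true))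
      = passB nums R C 0 (-1) (passB nums R C 0 1 (passB nums R C (-1) 0
          (passB nums R C 1 0 (List.replicate R (List.replicate C true))))) := rfl
  have hfinal_len : (([((1 : Int), (0 : Int)), (-1, 0), (0, 1), (0, -1)]).foldl
      (fun low d => passB nums R C d.1 d.2 low)
      (List.replicate R (List.replicate C true))).length = R := by
    rw [hfold]; exact s4.1
  have hfinal_row : ∀ i, i < R →
      ((([((1 : Int), (0 : Int)), (-1, 0), (0, 1), (0, -1)]).foldl
        (fun low d => passB nums R C d.1 d.2 low)
        (List.replicate R (List.replicate C true))).getD i []).length = C := by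
    intro i hi; rw [hfold]; exact s4.2 i hi
  have hmat : ([((1 : Int), (0 : Int)), (-1, 0), (0, 1), (0, -1)]).foldl
      (fun low d => passB nums R C d.1 d.2 low)
      (List.replicate R (List.replicate C true))
      = (List.range R).map (fun r => (List.range C).map
          (fun c => checkA nums R C r c [(1, 0), (-1, 0), (0, 1), (0, -1)])) := by
    apply List.ext_getElem
    · rw [hfinal_len]; simp
    · intro i h1 h2
      have hi : i < R := hfinal_len ▸ h1
      apply List.ext_getElem
      · have hl := hfinal_row i hi
        rw [List.getD_eq_getElem _ _ h1] at hl
        rw [hl]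
        simp
      · intro j h3 h4
        have hj : j < C := by simpa using h4
        have hv := hcell i hi j hj
        rw [List.getD_eq_getElem _ _ h1, List.getD_eq_getElem _ _ h3] at hv
        simp only [List.getElem_map, List.getElem_range]
        exact hv
  rw [hmat, List.foldl_map]
  have main : ∀ (rs : List Nat) (a : Int),
      rs.foldl (fun acc r =>
        (List.range C).foldl (fun acc c =>
          if checkA nums R C r c [(1, 0), (-1, 0), (0, 1), (0, -1)] then acc + 1 else acc)
          acc) a =
      rs.foldl (fun s r =>
        s + (((List.range C).map
          (fun c => checkA nums R C r c [(1, 0), (-1, 0), (0, 1), (0, -1)])).count true : Int)) a := by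
    intro rs
    induction rs with
    | nil => intro a; rfl
    | cons r rs ih =>
        intro a
        simp only [List.foldl_cons]
        rw [foldl_count, ih]
  exact main (List.range R) 0

theorem solution_eq_alt (nums : List (List Int)) : solution nums = solution_alt nums :=
  count_eq nums nums.length (nums.headD []).length

-- ===== VERDICT (by name: the statement is the Claim_ definition above) =====
theorem solution_spec : Claim_equal_solution := by
  intro nums _ _
  exact (solution_eq_alt nums).symm ▸ rfl
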